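-- pv_equiv track=rewrite | github.com/PFE-GIG/criteria-scripts | label_comparator.py | compute_plans_correspondance
-- ===== SOURCE A (Python) =====
-- def compute_plans_correspondance(o_plans, t_plans):
--     '''
--     '''
--     plans_corresponding = {}
--     for o_color in o_plans.keys():
--         plans_corresponding[o_color] = list(t_plans.keys())[0]
--         for t_color in t_plans.keys():
--             if t_color != '[0. 0. 0.]':							# If the color is black, it's just error
--                 diff_curr = len(set(o_plans[o_color]) -
--                                 set(t_plans[plans_corresponding[o_color]]))
--                 diff_new = len(
--                     set(o_plans[o_color]) - set(t_plans[t_color]))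
--                 if(diff_new < diff_curr):
--                     plans_corresponding[o_color] = t_color
--
--     return plans_corresponding
-- ===== SOURCE B (Python) =====
-- def compute_plans_correspondance(o_plans, t_plans):
--     black = '[0. 0. 0.]'
--     # inverted index: element value -> t_colors (in t_plans order) whose plan contains it
--     index = {}
--     for t_color, plan in t_plans.items():
--         if t_color != black:
--             for v in set(plan):
--                 index.setdefault(v, []).append(t_color)
--     t_keys = list(t_plans.keys())
--     result = {}
--     for o_color, plan in o_plans.items():
--         set_o = set(plan)
--         counts = {}
--         for v in set_o:
--             for c in index.get(v, ()):
--                 counts[c] = counts.get(c, 0) + 1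
--         best = t_keys[0]
--         best_count = len(set_o & set(t_plans[best]))
--         for c in t_keys:
--             if c != black and counts.get(c, 0) > best_count:
--                 best, best_count = c, counts.get(c, 0)
--         result[o_color] = best
--     return result
-- ===== Notes on version B (the rewrite author's own statement) =====
-- stated objective: faster
-- what changed: Instead of recomputing two set differences against the current best for every (o_color, t_color) pair, B builds an inverted index (plan element -> non-black t_colors containing it) once, accumulates per-source intersection counts from it, and picks the best candidate in one running-maximum pass, using |set_o - set_t| = |set_o| - |set_o ∩ set_t|.
-- outside the precondition, e.g. on compute_plans_correspondance({'a': ['x']}, {}): A raises IndexError, B raises IndexError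
import Mathlib
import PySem

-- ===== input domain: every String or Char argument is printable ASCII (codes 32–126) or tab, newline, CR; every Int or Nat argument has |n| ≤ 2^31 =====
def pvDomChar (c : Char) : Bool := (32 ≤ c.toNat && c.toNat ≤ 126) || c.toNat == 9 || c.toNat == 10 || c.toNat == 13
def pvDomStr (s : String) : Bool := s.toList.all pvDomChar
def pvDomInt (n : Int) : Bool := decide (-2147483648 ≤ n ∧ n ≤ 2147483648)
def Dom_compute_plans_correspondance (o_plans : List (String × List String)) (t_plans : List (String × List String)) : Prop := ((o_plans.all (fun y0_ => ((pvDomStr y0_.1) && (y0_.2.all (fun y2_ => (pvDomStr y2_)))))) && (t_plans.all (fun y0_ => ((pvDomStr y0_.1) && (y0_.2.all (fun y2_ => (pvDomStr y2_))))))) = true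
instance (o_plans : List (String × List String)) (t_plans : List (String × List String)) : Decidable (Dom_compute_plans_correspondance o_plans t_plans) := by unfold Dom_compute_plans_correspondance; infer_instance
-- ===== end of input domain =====

-- B replaces A's quadratic rescanning of set differences by an inverted index (element -> candidate t_colors)
-- plus per-source intersection counts and a single running-best pass (objective: faster on large plan sets).


-- ===== PORT A =====
-- the black color key skipped by both programs
def pvBlack : String := "[0. 0. 0.]"

-- len(set(oplan) - set(t_plans[x]))  (A computes this twice per inner step; size is order-independent)
def pvDiffLen (oplan : List String) (tD : PySem.Dict String (List String)) (x : String) : Int :=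
  PySem.Set.len (PySem.Set.diff (PySem.Set.ofList oplan) (PySem.Set.ofList (tD.getD x [])))

-- A, literally: result dict over o keys; per key, default = first t key, then a scan over t keys
-- updating the dict entry whenever the set difference strictly shrinks.
-- (list(t_plans.keys())[0] raises IndexError when t_plans = {} and o_plans ≠ {}: Pre_ excludes that,
--  so the "" used by headD there is never observed inside the claim.)
def compute_plans_correspondance (o_plans : List (String × List String)) (t_plans : List (String × List String)) : List (String × String) :=
  let oD : PySem.Dict String (List String) := PySem.Dict.mk o_plans
  let tD : PySem.Dict String (List String) := PySem.Dict.mk t_plans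
  (oD.keys.foldl (fun d o_color =>
    let d := d.insert o_color (tD.keys.headD "")
    tD.keys.foldl (fun d t_color =>
      if t_color ≠ pvBlack then
        let diff_curr := pvDiffLen (oD.getD o_color []) tD (d.getD o_color "")
        let diff_new := pvDiffLen (oD.getD o_color []) tD t_color
        if diff_new < diff_curr then d.insert o_color t_color else d
      else d) d) PySem.Dict.empty).items

-- ===== PORT B =====
-- inverted index: element value -> list of non-black t_colors (in t order) whose plan contains it
-- (index.setdefault(v, []).append(c) = modify v [] (· ++ [c]))
def pvIndex (t_items : List (String × List String)) : PySem.Dict String (List String) :=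
  t_items.foldl (fun idx p =>
    if p.1 ≠ pvBlack then
      (PySem.Set.ofList p.2).foldl (fun idx v => idx.modify v [] (fun l => l ++ [p.1])) idx
    else idx) PySem.Dict.empty

-- counts[c] = counts.get(c, 0) + 1 accumulated over every index entry of every element of set_o
-- (the counts dict is only looked up afterwards, so set iteration order does not matter)
def pvCounts (index : PySem.Dict String (List String)) (set_o : PySem.Set String) : PySem.Dict String Int :=
  set_o.foldl (fun cnt v =>
    (index.getD v []).foldl (fun cnt c => cnt.insert c (cnt.getD c 0 + 1)) cnt) PySem.Dict.empty

-- len(set_o & set(t_plans[x]))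
def pvInterLen (set_o : PySem.Set String) (tD : PySem.Dict String (List String)) (x : String) : Int :=
  PySem.Set.len (PySem.Set.inter set_o (PySem.Set.ofList (tD.getD x [])))

def compute_plans_correspondance_alt (o_plans : List (String × List String)) (t_plans : List (String × List String)) : List (String × String) :=
  let oD : PySem.Dict String (List String) := PySem.Dict.mk o_plans
  let tD : PySem.Dict String (List String) := PySem.Dict.mk t_plans
  let index := pvIndex tD.items
  let t_keys := tD.keys
  (oD.items.foldl (fun r p =>
    let set_o := PySem.Set.ofList p.2
    let counts := pvCounts index set_o
    let best0 := t_keys.headD ""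
    let sel := t_keys.foldl (fun (s : String × Int) c =>
        if c ≠ pvBlack ∧ counts.getD c 0 > s.2 then (c, counts.getD c 0) else s)
      (best0, pvInterLen set_o tD best0)
    r.insert p.1 sel.1) PySem.Dict.empty).items

-- ===== PRECONDITION & SPEC =====
-- Pre_ excludes association lists with duplicate keys (the arguments are Python dicts, which cannot
-- contain them), and the case o_plans ≠ {} with t_plans = {}, on which A raises IndexError.
def Pre_compute_plans_correspondance (o_plans : List (String × List String)) (t_plans : List (String × List String)) : Prop :=
  (o_plans.map Prod.fst).Nodup ∧ (t_plans.map Prod.fst).Nodup ∧ (o_plans = [] ∨ t_plans ≠ [])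
instance (o_plans : List (String × List String)) (t_plans : List (String × List String)) : Decidable (Pre_compute_plans_correspondance o_plans t_plans) := by unfold Pre_compute_plans_correspondance; infer_instance
def pvWitness_compute_plans_correspondance : (List (String × List String)) × (List (String × List String)) :=
  ([("r", ["x", "y"]), ("g", ["z"])], [("[0. 0. 0.]", ["q"]), ("b", ["y", "z"])])

def Spec_compute_plans_correspondance (o_plans : List (String × List String)) (t_plans : List (String × List String)) (out : List (String × String)) : Prop := out = compute_plans_correspondance_alt o_plans t_plans
instance (o_plans : List (String × List String)) (t_plans : List (String × List String)) (out : List (String × String)) : Decidable (Spec_compute_plans_correspondance o_plans t_plans out) := by unfold Spec_compute_plans_correspondance; infer_instance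

-- ===== CLAIM (what is proved, stated in full; the proofs are below) =====
def Claim_equal_compute_plans_correspondance : Prop := ∀ (o_plans : List (String × List String)) (t_plans : List (String × List String)), Dom_compute_plans_correspondance o_plans t_plans → Pre_compute_plans_correspondance o_plans t_plans → Spec_compute_plans_correspondance o_plans t_plans (compute_plans_correspondance o_plans t_plans)

-- ===== LEMMAS AND PROOFS =====

-- all (value, t_color) pairs the index-building loop inserts, flattened in insertion order
def pvPairs (t : List (String × List String)) : List (String × String) :=
  t.flatMap (fun p => if p.1 ≠ pvBlack then (PySem.Set.ofList p.2).map (fun v => (v, p.1)) else [])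

lemma pvIndex_eq_pairs (t : List (String × List String)) :
    pvIndex t = (pvPairs t).foldl (fun d q => d.modify q.1 [] (fun l => l ++ [q.2])) PySem.Dict.empty := by
  rw [pvPairs, List.foldl_flatMap, pvIndex]
  apply PySem.List.foldl_congr_mem
  intro acc p _
  by_cases h : p.1 ≠ pvBlack <;> simp [h, List.foldl_map]

lemma getD_empty {ν : Type} (k : String) (d0 : ν) :
    (PySem.Dict.empty : PySem.Dict String ν).getD k d0 = d0 := by
  simp [PySem.Dict.getD, PySem.Dict.empty, PySem.Dict.get?]

lemma pvIndex_getD (t : List (String × List String)) (v : String) :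
    (pvIndex t).getD v [] = ((pvPairs t).filter (fun q => q.1 == v)).map (·.2) := by
  rw [pvIndex_eq_pairs, PySem.Dict.getD_foldl_modify_append, getD_empty, List.nil_append]

-- countP of a predicate and its negation partition the length
lemma countP_add_countP_not (l : List String) (p : String → Bool) :
    l.countP p + l.countP (fun a => !p a) = l.length := by
  induction l with
  | nil => rfl
  | cons a t ih => simp only [List.countP_cons]; by_cases h : p a <;> simp [h] <;> omega

-- lookup of an absent key
lemma get?_mk_of_not_mem (t : List (String × List String)) (c : String)
    (hc : c ∉ t.map Prod.fst) : (PySem.Dict.mk t).get? c = none := by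
  induction t with
  | nil => rfl
  | cons q rest ih =>
    obtain ⟨k, v⟩ := q
    simp only [List.map_cons, List.mem_cons, not_or] at hc
    rw [PySem.Dict.get?_mk_cons, if_neg (by simpa using Ne.symm hc.1)]
    exact ih hc.2

-- lookup of a pair actually present, under Nodup keys
lemma getD_mk_of_mem (t : List (String × List String)) (ht : (t.map Prod.fst).Nodup)
    (p : String × List String) (hp : p ∈ t) (d0 : List String) :
    (PySem.Dict.mk t).getD p.1 d0 = p.2 := by
  induction t with
  | nil => cases hp
  | cons q rest ih =>
    obtain ⟨k, v⟩ := q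
    simp only [List.map_cons, List.nodup_cons] at ht
    rcases List.mem_cons.mp hp with hp | hp
    · subst hp
      simp [PySem.Dict.getD, PySem.Dict.get?_mk_cons]
    · have hne : (k == p.1) = false := by
        simp only [beq_eq_false_iff_ne]
        intro h
        exact ht.1 (h ▸ List.mem_map_of_mem hp)
      simp only [PySem.Dict.getD, PySem.Dict.get?_mk_cons, hne]
      exact ih ht.2 hp

-- how often the pair (v, c) occurs among the index insertions: once iff c is a non-black
-- key of t whose plan contains v
lemma pairs_countP (t : List (String × List String)) (ht : (t.map Prod.fst).Nodup)
    (c : String) (hcb : c ≠ pvBlack) (v : String) :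
    (pvPairs t).countP (fun q => (q.2 == c) && (q.1 == v))
      = if v ∈ (PySem.Dict.mk t).getD c [] then 1 else 0 := by
  induction t with
  | nil => simp [pvPairs, PySem.Dict.getD, PySem.Dict.get?]
  | cons p rest ih =>
    obtain ⟨k, pl⟩ := p
    simp only [List.map_cons, List.nodup_cons] at ht
    have hrest := ih ht.2
    have htail : pvPairs ((k, pl) :: rest)
        = (if k ≠ pvBlack then (PySem.Set.ofList pl).map (fun v => (v, k)) else [])
          ++ pvPairs rest := by
      simp [pvPairs]
    rw [htail, List.countP_append]
    by_cases hpc : k = c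
    · -- the head entry is the (unique) one keyed c; the tail contributes 0
      have hnb : k ≠ pvBlack := hpc ▸ hcb
      have hcr : c ∉ rest.map Prod.fst := hpc ▸ ht.1
      have htail0 : (pvPairs rest).countP (fun q => (q.2 == c) && (q.1 == v)) = 0 := by
        rw [hrest]
        have : ¬ v ∈ (PySem.Dict.mk rest).getD c [] := by
          simp [PySem.Dict.getD, get?_mk_of_not_mem rest c hcr]
        simp [this]
      rw [htail0, if_pos hnb, List.countP_map]
      have hhead : (PySem.Set.ofList pl).countP ((fun q => (q.2 == c) && (q.1 == v)) ∘ (fun v => (v, k)))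
          = (PySem.Set.ofList pl).countP (fun x => x == v) := by
        apply List.countP_congr
        intro x _
        simp [hpc]
      rw [hhead, ← List.count_eq_countP]
      have hgd : (PySem.Dict.mk ((k, pl) :: rest)).getD c [] = pl := by
        rw [PySem.Dict.getD, PySem.Dict.get?_mk_cons, if_pos (by simpa using hpc)]
        rfl
      rw [hgd]
      by_cases hv : v ∈ pl
      · rw [List.count_eq_one_of_mem (PySem.Set.nodup_ofList pl) ((PySem.Set.mem_ofList pl v).mpr hv),
          if_pos hv, Nat.add_zero]
      · rw [List.count_eq_zero_of_not_mem (fun h => hv ((PySem.Set.mem_ofList pl v).mp h)), if_neg hv]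
    · -- a head entry keyed ≠ c contributes 0 and the lookup skips it
      have hhead0 : (if k ≠ pvBlack then (PySem.Set.ofList pl).map (fun v => (v, k)) else []).countP
          (fun q => (q.2 == c) && (q.1 == v)) = 0 := by
        by_cases hb : k ≠ pvBlack
        · rw [if_pos hb, List.countP_map]
          apply List.countP_eq_zero.mpr
          intro x _
          simp [hpc]
        · rw [if_neg hb]; rfl
      have hgd : (PySem.Dict.mk ((k, pl) :: rest)).getD c [] = (PySem.Dict.mk rest).getD c [] := by
        rw [PySem.Dict.getD, PySem.Dict.get?_mk_cons, if_neg (by simpa using hpc), PySem.Dict.getD]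
      rw [hhead0, hgd, Nat.zero_add]
      exact hrest

-- a 0/1-sum over Nat is a countP
lemma sum_map_ite_mem (T : List String) (l : List String) :
    (l.map (fun v => if v ∈ T then (1 : Nat) else 0)).sum = l.countP (fun v => decide (v ∈ T)) := by
  induction l with
  | nil => rfl
  | cons a l ih =>
    simp only [List.map_cons, List.sum_cons, List.countP_cons, ih]
    by_cases h : a ∈ T <;> simp [h, Nat.add_comm]

-- key correctness of the inverted-index counting: for a non-black key c of t,
-- counts.get(c, 0) is exactly |set_o ∩ set(t[c])|
lemma pvCounts_getD (t : List (String × List String)) (ht : (t.map Prod.fst).Nodup)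
    (S : List String) (c : String) (hcb : c ≠ pvBlack) :
    (pvCounts (pvIndex t) (PySem.Set.ofList S)).getD c 0
      = pvInterLen (PySem.Set.ofList S) (PySem.Dict.mk t) c := by
  rw [pvCounts, ← List.foldl_flatMap, PySem.Dict.getD_foldl_insert_add_one, getD_empty,
    List.count_flatMap, Int.zero_add]
  have hmap : (PySem.Set.ofList S).map (List.count c ∘ fun v => (pvIndex t).getD v [])
      = (PySem.Set.ofList S).map (fun v => if v ∈ (PySem.Dict.mk t).getD c [] then 1 else 0) := by
    apply List.map_congr_left
    intro v _
    show ((pvIndex t).getD v []).count c = _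
    rw [pvIndex_getD, List.count_eq_countP, List.countP_map, List.countP_filter]
    exact pairs_countP t ht c hcb v
  rw [hmap, sum_map_ite_mem]
  rw [pvInterLen, PySem.Set.len, PySem.Set.inter]
  rw [← List.countP_eq_length_filter]
  congr 1
  apply List.countP_congr
  intro x _
  simp [PySem.Set.contains_eq_listContains, List.contains_eq_mem, PySem.Set.mem_ofList]

-- A's inner dict loop is a scalar loop on the entry at o_color
lemma A_inner_scalar (tD : PySem.Dict String (List String)) (S : List String)
    (ks : List String) (d : PySem.Dict String String) (k b : String) :
    ks.foldl (fun d t_color =>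
      if t_color ≠ pvBlack then
        if pvDiffLen S tD t_color < pvDiffLen S tD (d.getD k "") then d.insert k t_color else d
      else d) (d.insert k b)
    = d.insert k (ks.foldl (fun b t_color =>
        if t_color ≠ pvBlack ∧ pvDiffLen S tD t_color < pvDiffLen S tD b then t_color else b) b) := by
  induction ks generalizing b with
  | nil => rfl
  | cons c rest ih =>
    simp only [List.foldl_cons, PySem.Dict.getD_insert_self]
    by_cases h1 : c ≠ pvBlack
    · rw [if_pos h1]
      by_cases h2 : pvDiffLen S tD c < pvDiffLen S tD b
      · rw [if_pos h2, if_pos ⟨h1, h2⟩, PySem.Dict.insert_insert_self]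
        exact ih c
      · rw [if_neg h2, if_neg (fun h => h2 h.2)]
        exact ih b
    · rw [if_neg h1, if_neg (fun h => h1 h.1)]
      exact ih b

-- |set_o \ T| = |set_o| - |set_o ∩ T|, so "difference strictly shrinks" = "intersection strictly grows"
lemma diffLen_inter (S : List String) (tD : PySem.Dict String (List String)) (x : String) :
    pvDiffLen S tD x = PySem.Set.len (PySem.Set.ofList S) - pvInterLen (PySem.Set.ofList S) tD x := by
  rw [pvDiffLen, pvInterLen, PySem.Set.len, PySem.Set.len, PySem.Set.len, PySem.Set.diff,
    PySem.Set.inter]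
  have h := countP_add_countP_not (PySem.Set.ofList S)
    (fun v => (PySem.Set.ofList (tD.getD x [])).contains v)
  rw [List.countP_eq_length_filter, List.countP_eq_length_filter] at h
  omega

-- the scalar A loop equals B's running-(best, count) loop, given counts correctness on ks
lemma scalar_eq_running (tD : PySem.Dict String (List String)) (S : List String)
    (counts : PySem.Dict String Int) :
    ∀ (ks : List String),
    (∀ c ∈ ks, c ≠ pvBlack → counts.getD c 0 = pvInterLen (PySem.Set.ofList S) tD c) →
    ∀ (b : String),
    ks.foldl (fun (s : String × Int) c =>
        if c ≠ pvBlack ∧ counts.getD c 0 > s.2 then (c, counts.getD c 0) else s)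
      (b, pvInterLen (PySem.Set.ofList S) tD b)
    = (ks.foldl (fun b t_color =>
        if t_color ≠ pvBlack ∧ pvDiffLen S tD t_color < pvDiffLen S tD b then t_color else b) b,
       pvInterLen (PySem.Set.ofList S)
         tD (ks.foldl (fun b t_color =>
           if t_color ≠ pvBlack ∧ pvDiffLen S tD t_color < pvDiffLen S tD b then t_color else b) b)) := by
  intro ks
  induction ks with
  | nil => intro _ b; rfl
  | cons c rest ih =>
    intro hok b
    have hok' : ∀ x ∈ rest, x ≠ pvBlack → counts.getD x 0 = pvInterLen (PySem.Set.ofList S) tD x :=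
      fun x hx => hok x (List.mem_cons_of_mem _ hx)
    simp only [List.foldl_cons]
    by_cases h1 : c ≠ pvBlack
    · have hcnt := hok c List.mem_cons_self h1
      have hiff : (pvDiffLen S tD c < pvDiffLen S tD b)
          ↔ (counts.getD c 0 > pvInterLen (PySem.Set.ofList S) tD b) := by
        rw [hcnt, diffLen_inter, diffLen_inter]
        omega
      by_cases h2 : pvDiffLen S tD c < pvDiffLen S tD b
      · rw [if_pos ⟨h1, hiff.mp h2⟩, if_pos ⟨h1, h2⟩, hcnt]
        exact ih hok' c
      · rw [if_neg (fun h => h2 (hiff.mpr h.2)), if_neg (fun h => h2 h.2)]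
        exact ih hok' b
    · rw [if_neg (fun h => h1 h.1), if_neg (fun h => h1 h.1)]
      exact ih hok' b

-- ===== VERDICT (by name: the statement is the Claim_ definition above) =====
theorem compute_plans_correspondance_spec : Claim_equal_compute_plans_correspondance := by
  intro o_plans t_plans _ hpre
  obtain ⟨hno, hnt, -⟩ := hpre
  unfold Spec_compute_plans_correspondance
  rw [compute_plans_correspondance, compute_plans_correspondance_alt]
  simp only [PySem.Dict.keys_mk]
  congr 1
  rw [List.foldl_map]
  apply PySem.List.foldl_congr_mem
  intro d p hp
  rw [getD_mk_of_mem o_plans hno p hp]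
  rw [A_inner_scalar (PySem.Dict.mk t_plans) p.2 (t_plans.map (fun x => x.1)) d p.1
    ((t_plans.map (fun x => x.1)).headD "")]
  rw [scalar_eq_running (PySem.Dict.mk t_plans) p.2
    (pvCounts (pvIndex t_plans) (PySem.Set.ofList p.2))
    (t_plans.map (fun x => x.1))
    (fun c _ hcb => pvCounts_getD t_plans hnt p.2 c hcb)
    ((t_plans.map (fun x => x.1)).headD "")]
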